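-- pv_equiv track=rewrite | github.com/202201735/A1-sorting-algorithms- | a1_sorting_algorithms.py | distribute_chocolates_recursively
-- ===== SOURCE A (Python) =====
-- def distribute_chocolates_recursively(chocolates, students, distribution=None):
--     # If the distribution dictionary is not provided, initialize it as an empty dictionary.
--     if distribution is None:
--         distribution = {}
--
--     # Check if there are enough chocolates for all students. If not, raise an error.
--     if len(students) > len(chocolates):
--         raise ValueError("Not enough chocolates for all students")
--
--     # Base case: if there are no students left to distribute chocolates to, return the distribution.
--     if not students:
--         return distribution
--
--     # Recursive case: assign the first chocolate to the first student in the list.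
--     student = students[0]
--     distribution[student] = chocolates[0]
--
--     # Recursively call the function with the remaining chocolates and students, passing the updated distribution.
--     return distribute_chocolates_recursively(chocolates[1:], students[1:], distribution)
-- ===== SOURCE B (Python) =====
-- def distribute_chocolates_recursively(chocolates, students, distribution=None):
--     if distribution is None:
--         distribution = {}
--     if len(students) > len(chocolates):
--         raise ValueError("Not enough chocolates for all students")
--     for s, c in zip(students, chocolates):
--         distribution[s] = c
--     return distribution
-- ===== Notes on version B (the rewrite author's own statement) =====
-- stated objective: faster
-- what changed: Replaced the recursion (which re-checks the length guard and copies both lists by slicing at every step) by a single up-front guard and one zip loop writing into the same dict.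
import Mathlib
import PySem

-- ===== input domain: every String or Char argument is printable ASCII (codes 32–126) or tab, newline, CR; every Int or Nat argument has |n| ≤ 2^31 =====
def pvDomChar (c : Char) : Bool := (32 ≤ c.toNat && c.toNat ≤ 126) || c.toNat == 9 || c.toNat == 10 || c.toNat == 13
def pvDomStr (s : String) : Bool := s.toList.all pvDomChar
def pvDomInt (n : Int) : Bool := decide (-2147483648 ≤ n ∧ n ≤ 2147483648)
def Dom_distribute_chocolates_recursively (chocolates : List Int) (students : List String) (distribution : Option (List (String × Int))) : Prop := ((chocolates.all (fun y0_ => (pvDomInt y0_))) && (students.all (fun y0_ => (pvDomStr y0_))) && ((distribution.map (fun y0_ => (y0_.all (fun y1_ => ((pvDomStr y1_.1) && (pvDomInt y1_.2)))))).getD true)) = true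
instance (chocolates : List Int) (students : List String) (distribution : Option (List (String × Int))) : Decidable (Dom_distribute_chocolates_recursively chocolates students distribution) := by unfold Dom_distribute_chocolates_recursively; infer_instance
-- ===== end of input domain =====

-- B replaces A's slice-and-recurse with a single up-front length guard and one zip fold: simpler.


-- ===== PORT A =====
-- the recursive body: re-checks the guard and recurses on the tails, like A
def pvA_go (chocolates : List Int) (students : List String) (dist : PySem.Dict String Int) : PySem.Dict String Int :=
  if students.length > chocolates.length then dist  -- Python raises ValueError here (outside Pre_)
  else match students, chocolates with
    | [], _ => dist
    | s :: st', c :: ch' => pvA_go ch' st' (dist.insert s c)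
    | _ :: _, [] => dist  -- unreachable: guard above ensures chocolates nonempty

def distribute_chocolates_recursively (chocolates : List Int) (students : List String) (distribution : Option (List (String × Int))) : List (String × Int) :=
  (pvA_go chocolates students (PySem.Dict.ofList (distribution.getD []))).items

-- ===== PORT B =====
def distribute_chocolates_recursively_alt (chocolates : List Int) (students : List String) (distribution : Option (List (String × Int))) : List (String × Int) :=
  let dist := PySem.Dict.ofList (distribution.getD [])
  if students.length > chocolates.length then dist.items  -- raise ValueError (outside Pre_)
  else ((students.zip chocolates).foldl (fun acc p => acc.insert p.1 p.2) dist).items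

-- ===== PRECONDITION & SPEC =====
-- Pre_ excludes exactly the inputs where A raises ValueError (more students than chocolates)
def Pre_distribute_chocolates_recursively (chocolates : List Int) (students : List String) (distribution : Option (List (String × Int))) : Prop :=
  students.length ≤ chocolates.length
instance (chocolates : List Int) (students : List String) (distribution : Option (List (String × Int))) : Decidable (Pre_distribute_chocolates_recursively chocolates students distribution) := by unfold Pre_distribute_chocolates_recursively; infer_instance

def pvWitness_distribute_chocolates_recursively : List Int × List String × (Option (List (String × Int))) :=
  ([3, 5, 7], ["ann", "bob"], some [("zed", 1)])

def Spec_distribute_chocolates_recursively (chocolates : List Int) (students : List String) (distribution : Option (List (String × Int))) (out : List (String × Int)) : Prop := out = distribute_chocolates_recursively_alt chocolates students distribution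
instance (chocolates : List Int) (students : List String) (distribution : Option (List (String × Int))) (out : List (String × Int)) : Decidable (Spec_distribute_chocolates_recursively chocolates students distribution out) := by unfold Spec_distribute_chocolates_recursively; infer_instance

-- ===== CLAIM (what is proved, stated in full; the proofs are below) =====
def Claim_equal_distribute_chocolates_recursively : Prop := ∀ (chocolates : List Int) (students : List String) (distribution : Option (List (String × Int))), Dom_distribute_chocolates_recursively chocolates students distribution → Pre_distribute_chocolates_recursively chocolates students distribution → Spec_distribute_chocolates_recursively chocolates students distribution (distribute_chocolates_recursively chocolates students distribution)

-- ===== LEMMAS AND PROOFS =====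
theorem pvA_go_eq_foldl (students : List String) (chocolates : List Int)
    (dist : PySem.Dict String Int) (h : students.length ≤ chocolates.length) :
    pvA_go chocolates students dist
      = (students.zip chocolates).foldl (fun acc p => acc.insert p.1 p.2) dist := by
  induction students generalizing chocolates dist with
  | nil => unfold pvA_go; simp
  | cons s st' ih =>
    cases chocolates with
    | nil => simp at h
    | cons c ch' =>
      simp at h
      unfold pvA_go
      rw [if_neg (by simp; omega)]
      simpa using ih ch' (dist.insert s c) h

-- ===== VERDICT (by name: the statement is the Claim_ definition above) =====
theorem distribute_chocolates_recursively_spec : Claim_equal_distribute_chocolates_recursively := by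
  intro ch st d _ hpre
  unfold Spec_distribute_chocolates_recursively distribute_chocolates_recursively distribute_chocolates_recursively_alt
  rw [pvA_go_eq_foldl st ch _ hpre, if_neg (by exact not_lt.mpr hpre)]
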